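-- pv_equiv track=rewrite | github.com/hikariatama/Hikka | hikka/modules/hikka_security.py | _extract_time
-- ===== SOURCE A (Python) =====
-- def _extract_time(args: list) -> int:
--     suffixes = {
--         "d": 24 * 60 * 60,
--         "h": 60 * 60,
--         "m": 60,
--         "s": 1,
--     }
--     for suffix, quantifier in suffixes.items():
--         duration = next(
--             (
--                 int(arg.rsplit(suffix, maxsplit=1)[0])
--                 for arg in args
--                 if arg.endswith(suffix)
--                 and arg.rsplit(suffix, maxsplit=1)[0].isdigit()
--             ),
--             None,
--         )
--         if duration is not None:
--             return duration * quantifier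
--
--     return 0
-- ===== SOURCE B (Python) =====
-- def _extract_time(args: list) -> int:
--     found = {}
--     for arg in args:
--         if arg:
--             suffix = arg[-1]
--             if suffix in "dhms" and suffix not in found and arg[:-1].isdigit():
--                 found[suffix] = int(arg[:-1])
--     for suffix, quantifier in (("d", 86400), ("h", 3600), ("m", 60), ("s", 1)):
--         if suffix in found:
--             return found[suffix] * quantifier
--     return 0
-- ===== Notes on version B (the rewrite author's own statement) =====
-- stated objective: faster
-- what changed: Replaces A's four separate scans of args (one per suffix, each re-doing endswith/rsplit/isdigit) by a single pass that records the first value per suffix in a dict, followed by a constant-size priority lookup over (d,h,m,s).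
import Mathlib
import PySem

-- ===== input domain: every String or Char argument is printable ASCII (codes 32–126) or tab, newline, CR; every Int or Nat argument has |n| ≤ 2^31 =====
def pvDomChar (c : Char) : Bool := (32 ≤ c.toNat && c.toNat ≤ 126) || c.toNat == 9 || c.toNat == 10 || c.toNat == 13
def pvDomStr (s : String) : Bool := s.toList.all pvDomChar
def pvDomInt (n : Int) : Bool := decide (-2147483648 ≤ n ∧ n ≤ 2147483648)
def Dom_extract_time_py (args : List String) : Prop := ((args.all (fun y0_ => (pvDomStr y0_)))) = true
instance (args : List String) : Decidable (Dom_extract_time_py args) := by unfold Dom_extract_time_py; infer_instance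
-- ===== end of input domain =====

-- B replaces A's four scans of args (one per suffix) by a single pass building a
-- first-match-per-suffix dict followed by a priority lookup; same cost class, plainer shape.

-- ===== PORT A =====
-- arg.rsplit(c, maxsplit=1)[0] for a single-char separator c, ported by hand (exact):
-- scan the reversed chars for the last occurrence of c; if found the head part is what
-- precedes it, else the whole string.
def pvRsplitAux (c : Char) : List Char → Option (List Char)
  | [] => none
  | x :: xs => if x = c then some xs else pvRsplitAux c xs

def pvRsplit1Head (cs : List Char) (c : Char) : List Char :=
  match pvRsplitAux c cs.reverse with
  | some ys => ys.reverse
  | none => cs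

-- the generator expression with next(..., None): first arg passing the guard, mapped to int(prefix).
-- int(prefix) is guarded by prefix.isdigit(), so ofChars? always succeeds here; .getD 0 is unreachable.
def pvFirstDuration (c : Char) : List String → Option Int
  | [] => none
  | a :: rest =>
    let cs := a.toList
    if PySem.Chars.endswith cs [c] && PySem.Chars.strIsdigit (pvRsplit1Head cs c) then
      some ((PySem.Int.ofChars? (pvRsplit1Head cs c)).getD 0)
    else pvFirstDuration c rest

def pvSuffixLoop (args : List String) : List (Char × Int) → Int
  | [] => 0
  | (c, q) :: rest =>
    match pvFirstDuration c args with
    | some d => d * q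
    | none => pvSuffixLoop args rest

def extract_time_py (args : List String) : Int :=
  pvSuffixLoop args [('d', 86400), ('h', 3600), ('m', 60), ('s', 1)]

-- ===== PORT B =====
-- one pass over args: record int(arg[:-1]) under suffix arg[-1] on first sight only
def pvStep (d : PySem.Dict Char Int) (a : String) : PySem.Dict Char Int :=
  let cs := a.toList
  match cs.getLast? with
  | none => d
  | some lc =>
    if (lc ∈ ['d', 'h', 'm', 's']) ∧ (d.get? lc).isNone = true
        ∧ PySem.Chars.strIsdigit cs.dropLast = true then
      d.insert lc ((PySem.Int.ofChars? cs.dropLast).getD 0)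
    else d

def pvPriority (found : PySem.Dict Char Int) : List (Char × Int) → Int
  | [] => 0
  | (c, q) :: rest =>
    match found.get? c with
    | some v => v * q
    | none => pvPriority found rest

def extract_time_py_alt (args : List String) : Int :=
  pvPriority (args.foldl pvStep PySem.Dict.empty)
    [('d', 86400), ('h', 3600), ('m', 60), ('s', 1)]

-- ===== PRECONDITION & SPEC =====
def Spec_extract_time_py (args : List String) (out : Int) : Prop := out = extract_time_py_alt args
instance (args : List String) (out : Int) : Decidable (Spec_extract_time_py args out) := by unfold Spec_extract_time_py; infer_instance

-- ===== CLAIM (what is proved, stated in full; the proofs are below) =====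
def Claim_equal_extract_time_py : Prop := ∀ (args : List String), Dom_extract_time_py args → Spec_extract_time_py args (extract_time_py args)

-- ===== LEMMAS AND PROOFS =====

-- A's per-arg guard characterised: it holds exactly when the string ends with c and its
-- dropLast is all digits, and then the rsplit head is the dropLast.
theorem pvRsplit1Head_concat (ys : List Char) (c : Char) : pvRsplit1Head (ys ++ [c]) c = ys := by
  simp [pvRsplit1Head, pvRsplitAux]

theorem pvEndswith_single (cs : List Char) (c : Char) :
    PySem.Chars.endswith cs [c] = true ↔ ∃ ys, cs = ys ++ [c] := by
  rw [PySem.Chars.endswith_iff]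
  constructor
  · rintro ⟨t, rfl⟩; exact ⟨t, rfl⟩
  · rintro ⟨ys, rfl⟩; exact ⟨ys, rfl⟩

-- invariant of B's single pass: folding from d, the entry at suffix c is d's entry if
-- present, else A's first match among the remaining args.
theorem pvBuild_get (c : Char) (hc : c ∈ ['d', 'h', 'm', 's']) :
    ∀ (args : List String) (d : PySem.Dict Char Int),
      (args.foldl pvStep d).get? c =
        match d.get? c with
        | some v => some v
        | none => pvFirstDuration c args := by
  intro args
  induction args with
  | nil => intro d; cases hd : d.get? c <;> simp [pvFirstDuration, hd]
  | cons a rest ih =>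
    intro d
    simp only [List.foldl_cons]
    rw [ih]
    by_cases hend : PySem.Chars.endswith a.toList [c] = true
    · obtain ⟨ys, hys⟩ := (pvEndswith_single _ _).mp hend
      have hstep : pvStep d a =
          if (d.get? c).isNone = true ∧ PySem.Chars.strIsdigit ys = true then
            d.insert c ((PySem.Int.ofChars? ys).getD 0)
          else d := by
        simp [pvStep, hys, hc]
      by_cases hdig : PySem.Chars.strIsdigit ys = true
      · cases hd : d.get? c with
        | some v =>
          have : pvStep d a = d := by rw [hstep]; simp [hd]
          rw [this, hd]
        | none =>
          have : pvStep d a = d.insert c ((PySem.Int.ofChars? ys).getD 0) := by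
            rw [hstep]; simp [hd, hdig]
          rw [this, PySem.Dict.get?_insert_self]
          have hend2 : PySem.Chars.endswith (ys ++ [c]) [c] = true :=
            (pvEndswith_single _ _).mpr ⟨ys, rfl⟩
          simp [pvFirstDuration, hys, pvRsplit1Head_concat, hdig, hend2]
      · have hguard : ¬ (PySem.Chars.endswith a.toList [c] = true
            ∧ PySem.Chars.strIsdigit (pvRsplit1Head a.toList c) = true) := by
          rw [hys, pvRsplit1Head_concat]; tauto
        have : (pvStep d a).get? c = d.get? c := by
          simp only [pvStep]
          cases hl : a.toList.getLast? with
          | none => rfl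
          | some lc =>
            dsimp only
            split_ifs with h
            · rcases h with ⟨_, _, hdig'⟩
              have : lc = c := by
                have := List.getLast?_concat (l := ys) (a := c)
                rw [hys] at hl; rw [hl] at this; exact Option.some.inj this
              subst this
              rw [hys] at hdig'; rw [List.dropLast_concat] at hdig'
              exact absurd hdig' hdig
            · rfl
        rw [this]
        have : pvFirstDuration c (a :: rest) = pvFirstDuration c rest := by
          simp only [pvFirstDuration]
          rw [hys, pvRsplit1Head_concat]
          simp [hdig]
        rw [this]
    · -- a does not end with c: pvStep may insert another suffix but not c
      have hne : ∀ lc, a.toList.getLast? = some lc → lc ≠ c := by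
        intro lc hl rfl
        apply hend
        rw [pvEndswith_single]
        rcases List.eq_nil_or_concat a.toList with h | ⟨ys, x, hys2⟩
        · rw [h] at hl; simp at hl
        · rw [List.concat_eq_append] at hys2
          rw [hys2, List.getLast?_concat] at hl
          exact ⟨ys, by rw [hys2, Option.some.inj hl]⟩
      have : (pvStep d a).get? c = d.get? c := by
        simp only [pvStep]
        cases hl : a.toList.getLast? with
        | none => rfl
        | some lc =>
          dsimp only
          split_ifs with h
          · exact PySem.Dict.get?_insert_of_ne _ _ (Ne.symm (hne lc hl))
          · rfl
      rw [this]
      have : pvFirstDuration c (a :: rest) = pvFirstDuration c rest := by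
        simp [pvFirstDuration, hend]
      rw [this]

theorem pvBuild_get_empty (c : Char) (hc : c ∈ ['d', 'h', 'm', 's']) (args : List String) :
    (args.foldl pvStep PySem.Dict.empty).get? c = pvFirstDuration c args := by
  rw [pvBuild_get c hc args PySem.Dict.empty]
  simp [PySem.Dict.empty, PySem.Dict.get?]

-- ===== VERDICT (by name: the statement is the Claim_ definition above) =====
theorem extract_time_py_spec : Claim_equal_extract_time_py := by
  intro args _
  unfold Spec_extract_time_py extract_time_py extract_time_py_alt
  have hd := pvBuild_get_empty 'd' (by decide) args
  have hh := pvBuild_get_empty 'h' (by decide) args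
  have hm := pvBuild_get_empty 'm' (by decide) args
  have hs := pvBuild_get_empty 's' (by decide) args
  simp only [pvSuffixLoop, pvPriority, hd, hh, hm, hs]
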